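-- pv_equiv track=rewrite | github.com/k-walter/Codes | AOC/2020/11.py | iterDiagLeft
-- ===== SOURCE A (Python) =====
-- from typing import List, Tuple, TypeVar, Generator
--
-- def iterDiagLeft(grid: List[List[int]]) -> Generator[List[Tuple[int, int]], None, None]:
--     n: int = len(grid)
--     m: int = len(grid[0])
--
--     def iterDiag(i: int):
--         y: int = max(0, i)
--         x: int = min(m - 1, m - 1 + i)
--         while y < n and x >= 0:
--             yield (y, x)
--             y += 1
--             x -= 1
--     for i in range(1 - m, n):
--         yield list(iterDiag(i))
-- ===== SOURCE B (Python) =====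
-- def iterDiagLeft(grid):
--     n = len(grid)
--     m = len(grid[0])
--     buckets = [[] for _ in range(n + m - 1)]
--     for y in range(n):
--         for x in range(m):
--             buckets[y + x].append((y, x))
--     yield from buckets
-- ===== Notes on version B (the rewrite author's own statement) =====
-- stated objective: alternative
-- what changed: Replaces A's per-diagonal directed walk (an inner generator stepping mutable y,x for each offset) with a single row-major grouping pass that appends every cell to a bucket keyed by y+x and then yields the buckets in order.
import Mathlib
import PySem

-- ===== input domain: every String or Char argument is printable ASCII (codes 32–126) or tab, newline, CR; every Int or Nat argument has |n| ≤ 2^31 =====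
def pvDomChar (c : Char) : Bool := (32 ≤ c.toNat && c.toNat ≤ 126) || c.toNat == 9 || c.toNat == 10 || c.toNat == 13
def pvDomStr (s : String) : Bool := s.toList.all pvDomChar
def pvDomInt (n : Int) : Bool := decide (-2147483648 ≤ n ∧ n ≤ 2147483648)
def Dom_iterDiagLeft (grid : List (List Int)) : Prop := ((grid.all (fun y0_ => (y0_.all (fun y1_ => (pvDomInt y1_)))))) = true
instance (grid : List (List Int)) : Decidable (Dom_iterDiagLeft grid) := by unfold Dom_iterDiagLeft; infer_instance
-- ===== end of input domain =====

-- B replaces A's per-offset directed diagonal walk with one row-major grouping pass into buckets keyed by y+x; same values, same cost.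


-- ===== PORT A =====
-- the inner generator iterDiag(i): while y < n and x >= 0: yield (y,x); y += 1; x -= 1
def pvWalk (n y x : Int) : List (Int × Int) :=
  if _h : y < n ∧ 0 ≤ x then (y, x) :: pvWalk n (y + 1) (x - 1) else []
termination_by (n - y).toNat
decreasing_by omega

-- m = len(grid[0]) raises IndexError on []; Pre_ excludes the empty grid, so the getD default is never taken
def iterDiagLeft (grid : List (List Int)) : List (List (Int × Int)) :=
  let n : Int := grid.length
  let m : Int := ((PySem.List.pyGet? grid 0).getD []).length
  (PySem.List.pyRange (1 - m) n 1).map (fun i => pvWalk n (max 0 i) (min (m - 1) (m - 1 + i)))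

-- ===== PORT B =====
-- buckets[y + x].append((y, x)) — y + x ≥ 0 in the loop, so .toNat is exact
def iterDiagLeft_alt (grid : List (List Int)) : List (List (Int × Int)) :=
  let n : Int := grid.length
  let m : Int := ((PySem.List.pyGet? grid 0).getD []).length
  (PySem.List.pyRange 0 n 1).foldl
    (fun b y => (PySem.List.pyRange 0 m 1).foldl
      (fun b x => b.modify (y + x).toNat (fun l => l ++ [(y, x)])) b)
    (List.replicate (n + m - 1).toNat [])

-- ===== PRECONDITION & SPEC =====
-- Pre_ excludes only the empty grid, on which the Python A raises IndexError (len(grid[0]))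
def Pre_iterDiagLeft (grid : List (List Int)) : Prop := grid ≠ []
instance (grid : List (List Int)) : Decidable (Pre_iterDiagLeft grid) := by unfold Pre_iterDiagLeft; infer_instance
def pvWitness_iterDiagLeft : List (List Int) := [[1, 2], [3, 4]]
def Spec_iterDiagLeft (grid : List (List Int)) (out : List (List (Int × Int))) : Prop := out = iterDiagLeft_alt grid
instance (grid : List (List Int)) (out : List (List (Int × Int))) : Decidable (Spec_iterDiagLeft grid out) := by unfold Spec_iterDiagLeft; infer_instance

-- ===== CLAIM (what is proved, stated in full; the proofs are below) =====
def Claim_equal_iterDiagLeft : Prop := ∀ (grid : List (List Int)), Dom_iterDiagLeft grid → Pre_iterDiagLeft grid → Spec_iterDiagLeft grid (iterDiagLeft grid)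

-- ===== LEMMAS AND PROOFS =====

-- the contribution of row y to the bucket of diagonal s
def pvExtra (m s y : Int) : List (Int × Int) := if y ≤ s ∧ s < y + m then [(y, s - y)] else []

-- A's directed walk is exactly the arithmetic range of valid y values on its diagonal
theorem pvWalk_eq (n y x : Int) :
    pvWalk n y x = (PySem.List.pyRange y (min n (y + x + 1)) 1).map (fun t => (t, y + x - t)) := by
  fun_induction pvWalk n y x with
  | case1 y x h ih =>
    rw [PySem.List.pyRange_one_cons (by omega), ih]
    have h2 : min n (y + 1 + (x - 1) + 1) = min n (y + x + 1) := by omega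
    rw [h2]
    simp only [List.map_cons]
    refine congrArg₂ _ (by congr 1; ring) ?_
    apply List.map_congr_left
    intro t _
    simp only [Prod.mk.injEq, true_and]
    omega
  | case2 y x h =>
    rw [PySem.List.pyRange_one_eq_nil (by omega)]
    simp

-- A's diagonal for offset i in closed form
theorem pvDiag_eq (n m i : Int) :
    pvWalk n (max 0 i) (min (m - 1) (m - 1 + i)) =
      (PySem.List.pyRange (max 0 i) (min n (m + i)) 1).map (fun y => (y, m - 1 + i - y)) := by
  rw [pvWalk_eq]
  have hs : max 0 i + min (m - 1) (m - 1 + i) = m - 1 + i := by omega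
  have hb : min n (max 0 i + min (m - 1) (m - 1 + i) + 1) = min n (m + i) := by omega
  rw [hb]
  simp only [hs]

-- inner loop over x (natural count): bucket s gains row y's contribution
theorem pvInner_get?_nat (y : Int) (hy : 0 ≤ y) (k : Nat) (b : List (List (Int × Int))) (s : Nat) :
    ((PySem.List.pyRange 0 (k : Int) 1).foldl
        (fun b x => b.modify (y + x).toNat (fun l => l ++ [(y, x)])) b)[s]?
      = b[s]?.map (fun l => l ++ pvExtra (k : Int) (s : Int) y) := by
  induction k with
  | zero =>
    rw [PySem.List.pyRange_one_eq_nil (by omega)]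
    simp only [List.foldl_nil, pvExtra]
    rw [if_neg (by omega)]
    cases b[s]? <;> simp
  | succ k ih =>
    have hsplit : PySem.List.pyRange 0 ((k : Nat) + 1 : Int) 1
        = PySem.List.pyRange 0 (k : Int) 1 ++ [(k : Int)] := by
      have := PySem.List.pyRange_one_succ_right (a := 0) (b := (k : Int)) (by omega)
      simpa using this
    have hcast : (((k : Nat) + 1 : Nat) : Int) = ((k : Nat) + 1 : Int) := by push_cast; ring
    rw [hcast, hsplit, List.foldl_append]
    simp only [List.foldl_cons, List.foldl_nil]
    rw [List.getElem?_modify, ih]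
    cases hb : b[s]? with
    | none => simp
    | some l =>
      simp only [Option.map_eq_map, Option.map_some, Option.some.injEq]
      by_cases hc : (s : Int) = y + (k : Int)
      · rw [if_pos (by omega)]
        simp only [pvExtra]
        rw [if_neg (by omega), if_pos (by omega)]
        simp only [List.append_nil]
        have : (s : Int) - y = (k : Int) := by omega
        rw [this]
      · rw [if_neg (by omega)]
        simp only [pvExtra]
        by_cases hd : y ≤ (s : Int) ∧ (s : Int) < y + (k : Int)
        · rw [if_pos hd, if_pos (by omega)]
        · rw [if_neg hd, if_neg (by omega)]

-- inner loop over x, integer count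
theorem pvInner_get? (y m : Int) (hy : 0 ≤ y) (b : List (List (Int × Int))) (s : Nat) :
    ((PySem.List.pyRange 0 m 1).foldl
        (fun b x => b.modify (y + x).toNat (fun l => l ++ [(y, x)])) b)[s]?
      = b[s]?.map (fun l => l ++ pvExtra m (s : Int) y) := by
  by_cases hm : m ≤ 0
  · rw [PySem.List.pyRange_one_eq_nil (by omega)]
    simp only [List.foldl_nil, pvExtra]
    rw [if_neg (by omega)]
    cases b[s]? <;> simp
  · have hm' : ((m.toNat : Nat) : Int) = m := Int.toNat_of_nonneg (by omega)
    rw [← hm', pvInner_get?_nat y hy m.toNat b s]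

-- outer loop over y: bucket s is the concatenation of the rows' contributions
theorem pvOuter_get? (m : Int) (k : Nat) (b : List (List (Int × Int))) (s : Nat) :
    ((PySem.List.pyRange 0 (k : Int) 1).foldl
        (fun b y => (PySem.List.pyRange 0 m 1).foldl
          (fun b x => b.modify (y + x).toNat (fun l => l ++ [(y, x)])) b) b)[s]?
      = b[s]?.map (fun l => l ++ (PySem.List.pyRange 0 (k : Int) 1).flatMap (fun y => pvExtra m (s : Int) y)) := by
  induction k with
  | zero =>
    rw [PySem.List.pyRange_one_eq_nil (a := 0) (b := ((0 : Nat) : Int)) (by omega)]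
    simp only [List.foldl_nil, List.flatMap_nil]
    cases b[s]? <;> simp
  | succ k ih =>
    have hsplit : PySem.List.pyRange 0 ((k : Nat) + 1 : Int) 1
        = PySem.List.pyRange 0 (k : Int) 1 ++ [(k : Int)] := by
      have := PySem.List.pyRange_one_succ_right (a := 0) (b := (k : Int)) (by omega)
      simpa using this
    have hcast : (((k : Nat) + 1 : Nat) : Int) = ((k : Nat) + 1 : Int) := by push_cast; ring
    rw [hcast, hsplit, List.foldl_append]
    simp only [List.foldl_cons, List.foldl_nil]
    rw [pvInner_get? (k : Int) m (by omega), ih, List.flatMap_append]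
    cases b[s]? <;> simp

-- concatenating the rows' contributions gives the closed-form diagonal
theorem pvFlat (m s : Int) (hs : 0 ≤ s) (k : Nat) :
    (PySem.List.pyRange 0 (k : Int) 1).flatMap (fun y => pvExtra m s y)
      = (PySem.List.pyRange (max 0 (s - m + 1)) (min (k : Int) (s + 1)) 1).map (fun y => (y, s - y)) := by
  induction k with
  | zero =>
    rw [PySem.List.pyRange_one_eq_nil (by omega), PySem.List.pyRange_one_eq_nil (by omega)]
    simp
  | succ k ih =>
    have hsplit : PySem.List.pyRange 0 ((k : Nat) + 1 : Int) 1
        = PySem.List.pyRange 0 (k : Int) 1 ++ [(k : Int)] := by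
      have := PySem.List.pyRange_one_succ_right (a := 0) (b := (k : Int)) (by omega)
      simpa using this
    have hcast : (((k : Nat) + 1 : Nat) : Int) = ((k : Nat) + 1 : Int) := by push_cast; ring
    rw [hcast, hsplit, List.flatMap_append, ih]
    simp only [List.flatMap_cons, List.flatMap_nil, List.append_nil, pvExtra]
    by_cases hc : (k : Int) ≤ s ∧ s < (k : Int) + m
    · rw [if_pos hc]
      have h1 : min ((k : Int) + 1) (s + 1) = (k : Int) + 1 := by omega
      have h2 : min (k : Int) (s + 1) = (k : Int) := by omega
      rw [h1, h2, PySem.List.pyRange_one_succ_right (by omega), List.map_append]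
      simp
    · rw [if_neg hc]
      simp only [List.append_nil]
      by_cases hk : s < (k : Int)
      · have h1 : min ((k : Int) + 1) (s + 1) = s + 1 := by omega
        have h2 : min (k : Int) (s + 1) = s + 1 := by omega
        rw [h1, h2]
      · have hkm : s - m + 1 > (k : Int) := by omega
        rw [PySem.List.pyRange_one_eq_nil (by omega), PySem.List.pyRange_one_eq_nil (by omega)]

-- the two computations coincide for any dimensions n ≥ 1, m ≥ 0
theorem pvMain (n m : Int) (hn1 : 1 ≤ n) :
    (PySem.List.pyRange (1 - m) n 1).map (fun i => pvWalk n (max 0 i) (min (m - 1) (m - 1 + i)))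
      = (PySem.List.pyRange 0 n 1).foldl
          (fun b y => (PySem.List.pyRange 0 m 1).foldl
            (fun b x => b.modify (y + x).toNat (fun l => l ++ [(y, x)])) b)
          (List.replicate (n + m - 1).toNat []) := by
  apply List.ext_getElem?
  intro s
  -- B side: rewrite the loop as buckets
  have hncast : ((n.toNat : Nat) : Int) = n := Int.toNat_of_nonneg (by omega)
  rw [show (PySem.List.pyRange 0 n 1) = (PySem.List.pyRange 0 ((n.toNat : Nat) : Int) 1) by rw [hncast]]
  rw [pvOuter_get? m n.toNat (List.replicate (n + m - 1).toNat []) s]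
  rw [List.getElem?_map, List.getElem?_replicate, PySem.List.getElem?_pyRange_one]
  by_cases hs : s < (n + m - 1).toNat
  · rw [if_pos hs, if_pos (by omega)]
    simp only [Option.map_some, List.nil_append, Option.some.injEq]
    rw [pvDiag_eq, pvFlat m (s : Int) (by omega) n.toNat, hncast]
    have h1 : max 0 (1 - m + (s : Int)) = max 0 ((s : Int) - m + 1) := by omega
    have h2 : min n (m + (1 - m + (s : Int))) = min n ((s : Int) + 1) := by omega
    rw [h1, h2]
    apply List.map_congr_left
    intro t _
    simp only [Prod.mk.injEq, true_and]
    omega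
  · rw [if_neg hs, if_neg (by omega)]
    simp

-- ===== VERDICT (by name: the statement is the Claim_ definition above) =====
theorem iterDiagLeft_spec : Claim_equal_iterDiagLeft := by
  intro grid _ hpre
  have hn1 : 1 ≤ (grid.length : Int) := by
    have : grid.length ≠ 0 := fun h => hpre (List.eq_nil_of_length_eq_zero h)
    omega
  unfold Spec_iterDiagLeft iterDiagLeft iterDiagLeft_alt
  exact pvMain (grid.length : Int) ((((PySem.List.pyGet? grid 0).getD []).length : Int)) hn1
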